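-- pv_equiv track=rewrite | github.com/guest1024/Diablo2-data | scripts/fetch_high_value_pages.py | select_arreat
-- ===== SOURCE A (Python) =====
-- def select_arreat(inventory: list[str]) -> list[str]:
--     patterns = [
--         ("/classes/", 7),
--         ("/skills/", 24),
--         ("/items/", 30),
--         ("/monsters/", 18),
--         ("/quests/", 10),
--         ("/maps/", 6),
--     ]
--     selected: list[str] = []
--     for fragment, quota in patterns:
--         matches = [
--             url
--             for url in inventory
--             if fragment in url and url.endswith(".shtml")
--         ]
--         selected.extend(matches[:quota])
--     return selected
-- ===== SOURCE B (Python) =====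
-- def select_arreat(inventory: list[str]) -> list[str]:
--     # single pass: bucket each qualifying URL under every fragment it contains
--     classes, skills, items, monsters, quests, maps_ = [], [], [], [], [], []
--     for url in inventory:
--         if url.endswith(".shtml"):
--             if "/classes/" in url:
--                 classes.append(url)
--             if "/skills/" in url:
--                 skills.append(url)
--             if "/items/" in url:
--                 items.append(url)
--             if "/monsters/" in url:
--                 monsters.append(url)
--             if "/quests/" in url:
--                 quests.append(url)
--             if "/maps/" in url:
--                 maps_.append(url)
--     return (classes[:7] + skills[:24] + items[:30]
--             + monsters[:18] + quests[:10] + maps_[:6])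
-- ===== Notes on version B (the rewrite author's own statement) =====
-- stated objective: alternative
-- what changed: One pass over inventory bucketing each '.shtml' URL under every fragment it contains, then emitting the six quota-truncated buckets in pattern order, instead of six separate scans of inventory.
import Mathlib
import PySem

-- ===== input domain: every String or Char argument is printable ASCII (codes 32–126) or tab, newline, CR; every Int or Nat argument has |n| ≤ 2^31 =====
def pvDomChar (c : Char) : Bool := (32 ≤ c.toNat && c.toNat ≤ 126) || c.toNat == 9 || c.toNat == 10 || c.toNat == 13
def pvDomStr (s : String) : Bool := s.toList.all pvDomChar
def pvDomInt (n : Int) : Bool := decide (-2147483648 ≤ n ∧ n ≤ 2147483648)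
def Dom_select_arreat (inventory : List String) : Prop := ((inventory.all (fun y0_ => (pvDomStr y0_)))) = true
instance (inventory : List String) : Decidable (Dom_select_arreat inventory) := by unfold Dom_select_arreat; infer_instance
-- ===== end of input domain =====

-- B replaces A's six scans of inventory by one bucketing pass; alternative decomposition, same cost.

-- ===== PORT A =====
def select_arreat (inventory : List String) : List String :=
  let patterns : List (String × Int) :=
    [("/classes/", 7), ("/skills/", 24), ("/items/", 30),
     ("/monsters/", 18), ("/quests/", 10), ("/maps/", 6)]
  patterns.foldl (fun selected fq =>
    let matched := inventory.filter
      (fun url => PySem.Str.isIn fq.1 url && PySem.Str.endswith url ".shtml")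
    selected ++ PySem.List.slice matched none (some fq.2)) []

-- ===== PORT B =====
def select_arreat_alt (inventory : List String) : List String :=
  let b :=
    inventory.foldl (fun s url =>
      if PySem.Str.endswith url ".shtml" then
        (if PySem.Str.isIn "/classes/" url then s.1 ++ [url] else s.1,
         if PySem.Str.isIn "/skills/" url then s.2.1 ++ [url] else s.2.1,
         if PySem.Str.isIn "/items/" url then s.2.2.1 ++ [url] else s.2.2.1,
         if PySem.Str.isIn "/monsters/" url then s.2.2.2.1 ++ [url] else s.2.2.2.1,
         if PySem.Str.isIn "/quests/" url then s.2.2.2.2.1 ++ [url] else s.2.2.2.2.1,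
         if PySem.Str.isIn "/maps/" url then s.2.2.2.2.2 ++ [url] else s.2.2.2.2.2)
      else s)
      (([], [], [], [], [], []) :
        List String × List String × List String × List String × List String × List String)
  b.1.take 7 ++ b.2.1.take 24 ++ b.2.2.1.take 30
    ++ b.2.2.2.1.take 18 ++ b.2.2.2.2.1.take 10 ++ b.2.2.2.2.2.take 6

-- ===== PRECONDITION & SPEC =====
def Spec_select_arreat (inventory : List String) (out : List String) : Prop := out = select_arreat_alt inventory
instance (inventory : List String) (out : List String) : Decidable (Spec_select_arreat inventory out) := by unfold Spec_select_arreat; infer_instance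

-- ===== CLAIM (what is proved, stated in full; the proofs are below) =====
def Claim_equal_select_arreat : Prop := ∀ (inventory : List String), Dom_select_arreat inventory → Spec_select_arreat inventory (select_arreat inventory)

-- ===== LEMMAS AND PROOFS =====

-- predicate of A's comprehension, for a fixed fragment
def pvQ (f url : String) : Bool := PySem.Str.isIn f url && PySem.Str.endswith url ".shtml"

-- loop invariant for B's single pass: each bucket accumulates the filtered URLs
theorem pvFold_inv (inv : List String)
    (s : List String × List String × List String × List String × List String × List String) :
    inv.foldl (fun s url =>
      if PySem.Str.endswith url ".shtml" then
        (if PySem.Str.isIn "/classes/" url then s.1 ++ [url] else s.1,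
         if PySem.Str.isIn "/skills/" url then s.2.1 ++ [url] else s.2.1,
         if PySem.Str.isIn "/items/" url then s.2.2.1 ++ [url] else s.2.2.1,
         if PySem.Str.isIn "/monsters/" url then s.2.2.2.1 ++ [url] else s.2.2.2.1,
         if PySem.Str.isIn "/quests/" url then s.2.2.2.2.1 ++ [url] else s.2.2.2.2.1,
         if PySem.Str.isIn "/maps/" url then s.2.2.2.2.2 ++ [url] else s.2.2.2.2.2)
      else s) s
    = (s.1 ++ inv.filter (pvQ "/classes/"),
       s.2.1 ++ inv.filter (pvQ "/skills/"),
       s.2.2.1 ++ inv.filter (pvQ "/items/"),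
       s.2.2.2.1 ++ inv.filter (pvQ "/monsters/"),
       s.2.2.2.2.1 ++ inv.filter (pvQ "/quests/"),
       s.2.2.2.2.2 ++ inv.filter (pvQ "/maps/")) := by
  induction inv generalizing s with
  | nil => simp
  | cons url rest ih =>
    rw [List.foldl_cons, ih]
    by_cases he : PySem.Str.endswith url ".shtml"
    · simp only [he, if_true, Prod.mk.injEq]
      refine ⟨?_, ?_, ?_, ?_, ?_, ?_⟩ <;>
        · simp only [List.filter_cons, pvQ, he, Bool.and_true]
          split_ifs <;> simp
    · rw [Bool.not_eq_true] at he
      simp at he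
      simp [he, pvQ]

-- ===== VERDICT (by name: the statement is the Claim_ definition above) =====
theorem select_arreat_spec : Claim_equal_select_arreat := by
  intro inventory _
  unfold Spec_select_arreat select_arreat select_arreat_alt
  simp only [List.foldl_cons, List.foldl_nil, pvFold_inv]
  simp [PySem.List.slice_to]
  rfl
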